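-- pv_equiv track=rewrite | github.com/4dreadhead/Cryptography | methods/scytale.py | transform
-- ===== SOURCE A (Python) =====
-- def transform(incoming_string, table_size):
--     table = []
--     for i in range(table_size["row_count"]):
--         table.append(incoming_string[:table_size["row_size"]])
--         incoming_string = incoming_string[table_size["row_size"]:]
--
--     result_table = [["" for _ in range(table_size["row_count"])] for _ in range(table_size["row_size"])]
--     for i in range(table_size["row_count"]):
--         for j in range(table_size["row_size"]):
--             result_table[j][i] = table[i][j]
--
--     result = ""
--     for row in result_table:
--         result += "".join(row)
--     return result
-- ===== SOURCE B (Python) =====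
-- def transform(incoming_string, table_size):
--     row_count = table_size["row_count"]
--     row_size = table_size["row_size"]
--     return "".join(incoming_string[i * row_size + j]
--                    for j in range(row_size)
--                    for i in range(row_count))
-- ===== Notes on version B (the rewrite author's own statement) =====
-- stated objective: simpler
-- what changed: B drops the row-chunk list and the transposed 2D grid entirely and emits the column-major result with one join over direct index arithmetic incoming_string[i*row_size+j].
import Mathlib
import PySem

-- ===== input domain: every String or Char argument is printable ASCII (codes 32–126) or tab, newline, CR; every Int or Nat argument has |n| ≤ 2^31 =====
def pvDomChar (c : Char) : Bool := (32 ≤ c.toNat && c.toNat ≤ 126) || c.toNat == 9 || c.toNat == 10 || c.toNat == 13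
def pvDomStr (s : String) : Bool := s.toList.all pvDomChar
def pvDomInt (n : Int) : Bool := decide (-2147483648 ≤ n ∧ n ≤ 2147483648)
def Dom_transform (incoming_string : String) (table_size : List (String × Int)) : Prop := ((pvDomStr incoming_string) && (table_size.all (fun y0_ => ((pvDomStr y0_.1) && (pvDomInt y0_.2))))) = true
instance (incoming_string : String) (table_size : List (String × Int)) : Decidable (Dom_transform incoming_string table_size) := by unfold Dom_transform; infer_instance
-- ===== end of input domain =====

-- B replaces A's row-chunk list plus transposed grid with a single column-major join by index arithmetic (objective: simpler).

-- ===== PORT A =====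
-- Literal transliteration of A. Strings are handled on the List Char side (PySem.Chars/List primitives);
-- the pyGetD/pyGet? defaults below are the IndexError points of the Python — unreachable under Pre_transform.
def transform (incoming_string : String) (table_size : List (String × Int)) : String :=
  match PySem.Dict.get? (PySem.Dict.mk table_size) "row_count", PySem.Dict.get? (PySem.Dict.mk table_size) "row_size" with
  | some rc, some rs =>
    -- first loop: build `table`, consuming `incoming_string`
    let p := (PySem.List.pyRange 0 rc 1).foldl
      (fun (st : List (List Char) × List Char) _ =>
        (st.1 ++ [PySem.List.slice st.2 none (some rs)], PySem.List.slice st.2 (some rs) none))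
      ([], incoming_string.toList)
    let table := p.1
    -- result_table = [["" …] …]
    let rt0 : List (List (List Char)) :=
      (PySem.List.pyRange 0 rs 1).map (fun _ => (PySem.List.pyRange 0 rc 1).map (fun _ => ([] : List Char)))
    -- nested loops: result_table[j][i] = table[i][j]
    let rt := (PySem.List.pyRange 0 rc 1).foldl (fun mt i =>
        (PySem.List.pyRange 0 rs 1).foldl (fun m2 j =>
          PySem.List.pySetD m2 j
            (PySem.List.pySetD (PySem.List.pyGetD m2 j []) i
              ((PySem.List.pyGet? (PySem.List.pyGetD table i []) j).elim [] (fun c => [c])))) mt) rt0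
    -- result += "".join(row)
    String.ofList (rt.foldl (fun r row => r ++ PySem.Chars.join [] row) [])
  | _, _ => ""  -- KeyError: excluded by Pre_transform

-- ===== PORT B =====
def transform_alt (incoming_string : String) (table_size : List (String × Int)) : String :=
  match PySem.Dict.get? (PySem.Dict.mk table_size) "row_count" with
  | none => ""  -- KeyError: excluded by Pre_transform
  | some rc =>
    match PySem.Dict.get? (PySem.Dict.mk table_size) "row_size" with
    | none => ""  -- KeyError: excluded by Pre_transform
    | some rs =>
      -- "".join(incoming_string[i*row_size + j] for j in range(row_size) for i in range(row_count))
      String.ofList (((PySem.List.pyRange 0 rs 1).flatMap (fun j =>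
          (PySem.List.pyRange 0 rc 1).map (fun i =>
            PySem.List.pyGet? incoming_string.toList (i * rs + j)))).reduceOption)

-- ===== PRECONDITION & SPEC =====
-- Pre_ excludes exactly the inputs where A raises: a missing "row_count"/"row_size" key (KeyError),
-- or positive sizes whose full grid does not fit in the string (IndexError at table[i][j]).
def Pre_transform (incoming_string : String) (table_size : List (String × Int)) : Prop :=
  (PySem.Dict.get? (PySem.Dict.mk table_size) "row_count").isSome ∧
  (PySem.Dict.get? (PySem.Dict.mk table_size) "row_size").isSome ∧
  (0 < (PySem.Dict.get? (PySem.Dict.mk table_size) "row_count").getD 0 →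
   0 < (PySem.Dict.get? (PySem.Dict.mk table_size) "row_size").getD 0 →
   (PySem.Dict.get? (PySem.Dict.mk table_size) "row_count").getD 0 * (PySem.Dict.get? (PySem.Dict.mk table_size) "row_size").getD 0
     ≤ (incoming_string.toList.length : Int))
instance (incoming_string : String) (table_size : List (String × Int)) : Decidable (Pre_transform incoming_string table_size) := by unfold Pre_transform; infer_instance

def pvWitness_transform : String × (List (String × Int)) :=
  ("abcdefgh", [("row_count", 2), ("row_size", 4)])

def Spec_transform (incoming_string : String) (table_size : List (String × Int)) (out : String) : Prop := out = transform_alt incoming_string table_size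
instance (incoming_string : String) (table_size : List (String × Int)) (out : String) : Decidable (Spec_transform incoming_string table_size out) := by unfold Spec_transform; infer_instance

-- ===== CLAIM (what is proved, stated in full; the proofs are below) =====
def Claim_equal_transform : Prop := ∀ (incoming_string : String) (table_size : List (String × Int)), Dom_transform incoming_string table_size → Pre_transform incoming_string table_size → Spec_transform incoming_string table_size (transform incoming_string table_size)

-- ===== LEMMAS AND PROOFS =====

theorem pvReduceOptionMapSome {a : Type} (l : List a) : (l.map some).reduceOption = l := by
  induction l with
  | nil => rfl
  | cons x t ih => simp [List.reduceOption_cons_of_some, ih]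

theorem pvChunkFold (m : Nat) : ∀ (l : List Int) (cs : List Char) (acc : List (List Char)),
    l.foldl (fun (st : List (List Char) × List Char) _ => (st.1 ++ [st.2.take m], st.2.drop m)) (acc, cs)
    = (acc ++ (List.range l.length).map (fun i => ((cs.drop (i*m)).take m)), cs.drop (l.length * m)) := by
  intro l
  induction l with
  | nil => intro cs acc; simp
  | cons x t ih =>
    intro cs acc
    simp only [List.foldl_cons, ih, List.length_cons, List.range_succ_eq_map, List.map_cons,
      List.map_map]
    rw [Prod.mk.injEq]
    refine ⟨?_, ?_⟩
    · rw [List.append_assoc]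
      congr 1
      rw [List.singleton_append]
      congr 1
      · simp
      · apply List.map_congr_left
        intro k _
        simp only [Function.comp_apply, List.drop_drop]
        congr 2
        rw [Nat.succ_mul, Nat.add_comm]
    · rw [List.drop_drop]
      congr 1
      rw [Nat.add_mul, Nat.one_mul]
      exact Nat.add_comm _ _

theorem pvInnerFold (i : Int) (w : Int → List Char) (R : Int → List (List Char)) :
    ∀ (k : Nat) (a b : Int) (P : List (List (List Char))), 0 ≤ a → (b - a).toNat = k →
    P.length = a.toNat →
    (PySem.List.pyRange a b 1).foldl
      (fun m2 j => PySem.List.pySetD m2 j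
        (PySem.List.pySetD (PySem.List.pyGetD m2 j []) i (w j)))
      (P ++ (PySem.List.pyRange a b 1).map R)
    = P ++ (PySem.List.pyRange a b 1).map (fun j => PySem.List.pySetD (R j) i (w j)) := by
  intro k
  induction k with
  | zero =>
    intro a b P ha hk hP
    rw [PySem.List.pyRange_one_eq_nil (by omega)]
    simp
  | succ k ih =>
    intro a b P ha hk hP
    have hab : a < b := by omega
    rw [PySem.List.pyRange_one_cons hab]
    simp only [List.map_cons, List.foldl_cons]
    have haP : a = (P.length : Int) := by omega
    rw [haP]
    rw [PySem.List.pyGetD_natCast, PySem.List.pySetD_natCast]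
    have hget : (P ++ R (P.length : Int) :: (PySem.List.pyRange ((P.length : Int) + 1) b 1).map R).getD P.length []
        = R (P.length : Int) := by
      simp [List.getD]
    have hset : (P ++ R (P.length : Int) :: (PySem.List.pyRange ((P.length : Int) + 1) b 1).map R).set P.length
        (PySem.List.pySetD (R (P.length : Int)) i (w (P.length : Int)))
        = (P ++ [PySem.List.pySetD (R (P.length : Int)) i (w (P.length : Int))])
          ++ (PySem.List.pyRange ((P.length : Int) + 1) b 1).map R := by
      simp
    rw [hget, hset]
    rw [ih ((P.length : Int) + 1) b (P ++ [PySem.List.pySetD (R (P.length : Int)) i (w (P.length : Int))])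
      (by omega) (by omega) (by simp)]
    simp

theorem pvSetMapPyRange {α : Type} (n : Int) (c : Nat) (f : Int → α) (v : α) (h : (c:Int) < n) :
    PySem.List.pySetD ((PySem.List.pyRange 0 n 1).map f) (c:Int) v
    = (PySem.List.pyRange 0 n 1).map (fun x => if x = (c:Int) then v else f x) := by
  rw [PySem.List.pySetD_natCast]
  apply List.ext_getElem
  · simp
  · intro k h1 h2
    simp only [List.getElem_set, List.getElem_map, PySem.List.getElem_pyRange_one]
    have hk : (0:Int) + (k:Int) = (k:Int) := by omega
    rw [hk]
    by_cases hkc : k = c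
    · subst hkc; simp
    · rw [if_neg (by omega), if_neg (by exact_mod_cast hkc)]

theorem pvOuterFold (rc rs : Int) (w : Int → Int → List Char) :
    ∀ (c : Nat), (c:Int) ≤ rc →
    (PySem.List.pyRange 0 (c:Int) 1).foldl
      (fun mt i => (PySem.List.pyRange 0 rs 1).foldl
        (fun m2 j => PySem.List.pySetD m2 j
          (PySem.List.pySetD (PySem.List.pyGetD m2 j []) i (w i j))) mt)
      ((PySem.List.pyRange 0 rs 1).map (fun _ => (PySem.List.pyRange 0 rc 1).map (fun _ => ([]:List Char))))
    = (PySem.List.pyRange 0 rs 1).map (fun j => (PySem.List.pyRange 0 rc 1).map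
        (fun i => if i < (c:Int) then w i j else [])) := by
  intro c
  induction c with
  | zero =>
    intro _
    rw [show ((0:Nat):Int) = (0:Int) by rfl, PySem.List.pyRange_one_eq_nil (le_refl 0)]
    simp only [List.foldl_nil]
    apply List.map_congr_left; intro j _
    apply List.map_congr_left; intro x hx
    rw [PySem.List.mem_pyRange_one] at hx
    rw [if_neg (by omega)]
  | succ c ih =>
    intro hc
    push_cast
    rw [PySem.List.pyRange_one_succ_right (by omega), List.foldl_append]

    rw [ih (by omega)]
    simp only [List.foldl_cons, List.foldl_nil]
    have hin := pvInnerFold (c:Int) (fun j => w (c:Int) j)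
      (fun j => (PySem.List.pyRange 0 rc 1).map (fun i => if i < (c:Int) then w i j else []))
      rs.toNat 0 rs [] (le_refl 0) (by omega) rfl
    simp only [List.nil_append] at hin
    rw [hin]
    apply List.map_congr_left; intro j _
    rw [pvSetMapPyRange rc c _ _ (by omega)]
    apply List.map_congr_left; intro x hx
    rw [PySem.List.mem_pyRange_one] at hx
    by_cases hxc : x = (c:Int)
    · subst hxc; rw [if_pos rfl, if_pos (by omega)]
    · rw [if_neg hxc]
      by_cases hlt : x < (c:Int)
      · rw [if_pos hlt, if_pos (by omega)]
      · rw [if_neg hlt, if_neg (by omega)]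


-- ===== VERDICT (by name: the statement is the Claim_ definition above) =====
theorem transform_spec : Claim_equal_transform := by
  intro s ts _ hpre
  obtain ⟨h1, h2, h3⟩ := hpre
  obtain ⟨rc, hrc⟩ := Option.isSome_iff_exists.mp h1
  obtain ⟨rs, hrs⟩ := Option.isSome_iff_exists.mp h2
  simp only [hrc, hrs, Option.getD_some] at h3
  simp only [Spec_transform, transform, transform_alt, hrc, hrs]
  by_cases hrc0 : rc ≤ 0
  · rw [PySem.List.pyRange_one_eq_nil hrc0]
    simp only [List.map_nil, List.foldl_nil]
    have he : (List.flatMap (fun (j : Int) => ([] : List (Option Char))) (PySem.List.pyRange 0 rs 1)) = [] := by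
      simp [List.flatMap_eq_nil_iff]
    simp [he]
  by_cases hrs0 : rs ≤ 0
  · rw [PySem.List.pyRange_one_eq_nil hrs0]
    simp
  have hlen := h3 (by omega) (by omega)
  obtain ⟨n, hn⟩ : ∃ n : Nat, rc = (n : Int) := ⟨rc.toNat, (Int.toNat_of_nonneg (by omega)).symm⟩
  obtain ⟨m, hm⟩ : ∃ m : Nat, rs = (m : Int) := ⟨rs.toNat, (Int.toNat_of_nonneg (by omega)).symm⟩
  subst hn
  subst hm
  have hsliceto : ∀ xs : List Char, PySem.List.slice xs none (some ((m:Nat):Int)) = xs.take m := by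
    intro xs; rw [PySem.List.slice_to xs (by omega), Int.toNat_natCast]
  have hslicefrom : ∀ xs : List Char, PySem.List.slice xs (some ((m:Nat):Int)) none = xs.drop m := by
    intro xs; rw [PySem.List.slice_from xs (by omega), Int.toNat_natCast]
  simp only [hsliceto, hslicefrom]
  rw [pvChunkFold m]
  simp only [List.nil_append, PySem.List.length_pyRange_one, Int.sub_zero, Int.toNat_natCast]
  set tbl := List.map (fun i => List.take m (List.drop (i * m) s.toList)) (List.range n) with htbl
  rw [pvOuterFold ((n:Nat):Int) ((m:Nat):Int)
    (fun i j => ((PySem.List.pyGet? (PySem.List.pyGetD tbl i []) j).elim [] fun c => [c]))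
    n (le_refl _)]
  rw [PySem.List.foldl_append_eq_flatMap, List.nil_append, List.flatMap_map]
  have hkl : ∀ i' j' : Nat, i' < n → j' < m → i' * m + j' < s.toList.length := by
    intro i' j' hin' hjm'
    have h1 : i' * m + j' < (i' + 1) * m := by rw [Nat.add_mul, Nat.one_mul]; omega
    have h2 : (i' + 1) * m ≤ n * m := Nat.mul_le_mul_right m (by omega)
    have h3 : n * m ≤ s.toList.length := by exact_mod_cast hlen
    omega
  have hcell : ∀ j i : Int, 0 ≤ j → j < ((m:Nat):Int) → 0 ≤ i → i < ((n:Nat):Int) →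
      PySem.List.pyGet? (PySem.List.pyGetD tbl i []) j
      = some (s.toList.getD (i.toNat * m + j.toNat) ' ') := by
    intro j i hj0 hjm hi0 hin
    obtain ⟨i', rfl⟩ : ∃ k : Nat, i = (k : Int) := ⟨i.toNat, (Int.toNat_of_nonneg hi0).symm⟩
    obtain ⟨j', rfl⟩ : ∃ k : Nat, j = (k : Int) := ⟨j.toNat, (Int.toNat_of_nonneg hj0).symm⟩
    have hin' : i' < n := by exact_mod_cast hin
    have hjm' : j' < m := by exact_mod_cast hjm
    rw [htbl, PySem.List.pyGetD_natCast, PySem.List.getD_map_range _ n i' _ hin']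
    rw [PySem.List.pyGet?_natCast, List.getElem?_take, if_pos hjm', List.getElem?_drop]
    rw [List.getElem?_eq_getElem (hkl i' j' hin' hjm')]
    rw [Int.toNat_natCast, Int.toNat_natCast]
    rw [List.getD_eq_getElem s.toList ' ' (hkl i' j' hin' hjm')]
  have hBcell : ∀ j i : Int, 0 ≤ j → j < ((m:Nat):Int) → 0 ≤ i → i < ((n:Nat):Int) →
      PySem.List.pyGet? s.toList (i * ((m:Nat):Int) + j)
      = some (s.toList.getD (i.toNat * m + j.toNat) ' ') := by
    intro j i hj0 hjm hi0 hin
    obtain ⟨i', rfl⟩ : ∃ k : Nat, i = (k : Int) := ⟨i.toNat, (Int.toNat_of_nonneg hi0).symm⟩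
    obtain ⟨j', rfl⟩ : ∃ k : Nat, j = (k : Int) := ⟨j.toNat, (Int.toNat_of_nonneg hj0).symm⟩
    have hin' : i' < n := by exact_mod_cast hin
    have hjm' : j' < m := by exact_mod_cast hjm
    have hidx : ((i' : Int) * ((m:Nat):Int) + (j' : Int)) = ((i' * m + j' : Nat) : Int) := by
      push_cast; ring
    rw [hidx, PySem.List.pyGet?_natCast, List.getElem?_eq_getElem (hkl i' j' hin' hjm')]
    rw [Int.toNat_natCast, Int.toNat_natCast]
    rw [List.getD_eq_getElem s.toList ' ' (hkl i' j' hin' hjm')]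
  have hrowA : ∀ j ∈ PySem.List.pyRange 0 ((m:Nat):Int) 1,
      PySem.Chars.join [] ((PySem.List.pyRange 0 ((n:Nat):Int) 1).map (fun i =>
        if i < ((n:Nat):Int) then
          ((PySem.List.pyGet? (PySem.List.pyGetD tbl i []) j).elim [] fun c => [c])
        else []))
      = (PySem.List.pyRange 0 ((n:Nat):Int) 1).map
          (fun i => s.toList.getD (i.toNat * m + j.toNat) ' ') := by
    intro j hj
    rw [PySem.List.mem_pyRange_one] at hj
    have hmap : (PySem.List.pyRange 0 ((n:Nat):Int) 1).map (fun i =>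
        if i < ((n:Nat):Int) then
          ((PySem.List.pyGet? (PySem.List.pyGetD tbl i []) j).elim [] fun c => [c])
        else [])
        = (PySem.List.pyRange 0 ((n:Nat):Int) 1).map
            ((fun c => [c]) ∘ (fun i => s.toList.getD (i.toNat * m + j.toNat) ' ')) := by
      apply List.map_congr_left
      intro i hi
      rw [PySem.List.mem_pyRange_one] at hi
      rw [if_pos hi.2, hcell j i hj.1 hj.2 hi.1 hi.2, Option.elim_some]
      rfl
    rw [hmap, ← List.map_map, PySem.Chars.join_nil_singletons]
  rw [List.flatMap_congr hrowA]
  have hrowB : ∀ j ∈ PySem.List.pyRange 0 ((m:Nat):Int) 1,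
      (PySem.List.pyRange 0 ((n:Nat):Int) 1).map
        (fun i => PySem.List.pyGet? s.toList (i * ((m:Nat):Int) + j))
      = List.map some ((PySem.List.pyRange 0 ((n:Nat):Int) 1).map
          (fun i => s.toList.getD (i.toNat * m + j.toNat) ' ')) := by
    intro j hj
    rw [PySem.List.mem_pyRange_one] at hj
    rw [List.map_map]
    apply List.map_congr_left
    intro i hi
    rw [PySem.List.mem_pyRange_one] at hi
    rw [Function.comp_apply, hBcell j i hj.1 hj.2 hi.1 hi.2]
  rw [List.flatMap_congr hrowB, ← List.map_flatMap, pvReduceOptionMapSome]
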